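-- pv_equiv track=rewrite | github.com/Marco-Mannara/ArtificialVision-FacialFeatureClassifier | scripts/process_dataset_new.py | get_class_groups
-- ===== SOURCE A (Python) =====
-- def get_class_groups(label_dict):
--     groups = [[],[],[],[]]
--     flag = 0
--     for k,v in label_dict.items():
--         flag = 0
--         for i in range(3):
--             if v[i] == 1:
--                 flag = 1
--                 groups[i].append(k)
--         if flag == 0:
--             groups[3].append(k)
--     return groups
-- ===== SOURCE B (Python) =====
-- def get_class_groups(label_dict):
--     return [
--         [k for k, v in label_dict.items() if v[0] == 1],
--         [k for k, v in label_dict.items() if v[1] == 1],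
--         [k for k, v in label_dict.items() if v[2] == 1],
--         [k for k, v in label_dict.items() if v[0] != 1 and v[1] != 1 and v[2] != 1],
--     ]
-- ===== Notes on version B (the rewrite author's own statement) =====
-- stated objective: simpler
-- what changed: Replaces the single item-outer pass with a mutable flag and in-place index-dispatched appends by four index-outer comprehensions, deriving group 3 as the negation of the three membership tests instead of tracking a flag.
import Mathlib
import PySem

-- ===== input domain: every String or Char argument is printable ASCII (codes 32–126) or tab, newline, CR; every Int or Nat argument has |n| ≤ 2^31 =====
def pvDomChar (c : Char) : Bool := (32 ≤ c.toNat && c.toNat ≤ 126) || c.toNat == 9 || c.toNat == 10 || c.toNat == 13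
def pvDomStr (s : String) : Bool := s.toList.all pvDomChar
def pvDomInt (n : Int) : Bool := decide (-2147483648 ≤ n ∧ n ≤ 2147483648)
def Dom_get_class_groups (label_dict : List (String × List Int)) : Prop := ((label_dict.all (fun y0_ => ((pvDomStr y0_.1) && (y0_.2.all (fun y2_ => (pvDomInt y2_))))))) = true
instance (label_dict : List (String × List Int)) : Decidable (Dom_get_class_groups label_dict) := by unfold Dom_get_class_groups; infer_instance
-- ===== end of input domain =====

-- B builds the four groups by four separate index-outer comprehensions (group 3 = negation of the
-- three tests) instead of A's single flagged pass; objective: simpler.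


-- ===== PORT A =====
-- outer-loop state: ((groups[0], groups[1], groups[2], groups[3]), flag)
def gcgState := (List String × List String × List String × List String) × Int

-- one iteration of A's outer loop: flag = 0, inner loop over range(3), then the flag == 0 test
def gcgBody (st : gcgState) (kv : String × List Int) : gcgState :=
  let st1 : gcgState := (st.1, 0)                                     -- flag = 0
  let st2 := (PySem.List.pyRange 0 3 1).foldl (fun (acc : gcgState) i =>
      if PySem.List.pyGet? kv.2 i == some 1 then                      -- if v[i] == 1
        (if i == 0 then ((acc.1.1 ++ [kv.1], acc.1.2.1, acc.1.2.2.1, acc.1.2.2.2), (1 : Int))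
         else if i == 1 then ((acc.1.1, acc.1.2.1 ++ [kv.1], acc.1.2.2.1, acc.1.2.2.2), (1 : Int))
         else ((acc.1.1, acc.1.2.1, acc.1.2.2.1 ++ [kv.1], acc.1.2.2.2), (1 : Int)))
      else acc) st1
  if st2.2 == 0 then ((st2.1.1, st2.1.2.1, st2.1.2.2.1, st2.1.2.2.2 ++ [kv.1]), st2.2)
  else st2

def get_class_groups (label_dict : List (String × List Int)) : List (List String) :=
  let res := label_dict.foldl gcgBody (([], [], [], []), 0)
  [res.1.1, res.1.2.1, res.1.2.2.1, res.1.2.2.2]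

-- ===== PORT B =====
-- [k for k, v in label_dict.items() if v[i] == 1]
def gcgSel (label_dict : List (String × List Int)) (i : Int) : List String :=
  label_dict.filterMap (fun kv => if PySem.List.pyGet? kv.2 i == some 1 then some kv.1 else none)

-- [k for k, v in label_dict.items() if v[0] != 1 and v[1] != 1 and v[2] != 1]
def gcgSelNone (label_dict : List (String × List Int)) : List String :=
  label_dict.filterMap (fun kv =>
    if PySem.List.pyGet? kv.2 0 != some 1 && PySem.List.pyGet? kv.2 1 != some 1 && PySem.List.pyGet? kv.2 2 != some 1
    then some kv.1 else none)

def get_class_groups_alt (label_dict : List (String × List Int)) : List (List String) :=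
  [gcgSel label_dict 0, gcgSel label_dict 1, gcgSel label_dict 2, gcgSelNone label_dict]

-- ===== PRECONDITION & SPEC =====
-- A raises IndexError (v[i] for i in range(3)) exactly when some value has fewer than 3 entries.
def Pre_get_class_groups (label_dict : List (String × List Int)) : Prop :=
  (label_dict.all (fun kv => 3 ≤ kv.2.length)) = true
instance (label_dict : List (String × List Int)) : Decidable (Pre_get_class_groups label_dict) := by unfold Pre_get_class_groups; infer_instance

def pvWitness_get_class_groups : (List (String × List Int)) :=
  [("a", [1, 0, 0]), ("b", [0, 0, 0]), ("c", [1, 1, 1])]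

def Spec_get_class_groups (label_dict : List (String × List Int)) (out : List (List String)) : Prop := out = get_class_groups_alt label_dict
instance (label_dict : List (String × List Int)) (out : List (List String)) : Decidable (Spec_get_class_groups label_dict out) := by unfold Spec_get_class_groups; infer_instance

-- ===== CLAIM (what is proved, stated in full; the proofs are below) =====
def Claim_equal_get_class_groups : Prop := ∀ (label_dict : List (String × List Int)), Dom_get_class_groups label_dict → Pre_get_class_groups label_dict → Spec_get_class_groups label_dict (get_class_groups label_dict)

-- ===== LEMMAS AND PROOFS =====

-- one outer-loop iteration appends k to exactly the groups B's comprehensions select it for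
lemma gcgBody_fst (a b c d : List String) (f : Int) (k : String) (v : List Int) :
    (gcgBody ((a, b, c, d), f) (k, v)).1 =
      (a ++ (if PySem.List.pyGet? v 0 == some 1 then [k] else []),
       b ++ (if PySem.List.pyGet? v 1 == some 1 then [k] else []),
       c ++ (if PySem.List.pyGet? v 2 == some 1 then [k] else []),
       d ++ (if PySem.List.pyGet? v 0 != some 1 && PySem.List.pyGet? v 1 != some 1 && PySem.List.pyGet? v 2 != some 1
             then [k] else [])) := by
  have hr : PySem.List.pyRange 0 3 1 = [0, 1, 2] := by decide
  unfold gcgBody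
  rw [hr]
  by_cases h0 : PySem.List.pyGet? v 0 = some 1 <;>
  by_cases h1 : PySem.List.pyGet? v 1 = some 1 <;>
  by_cases h2 : PySem.List.pyGet? v 2 = some 1 <;>
    simp [h0, h1, h2]

-- the whole fold, from any start state, appends B's four selections
lemma gcg_fold (label_dict : List (String × List Int)) (a b c d : List String) (f : Int) :
    (label_dict.foldl gcgBody ((a, b, c, d), f)).1 =
      (a ++ gcgSel label_dict 0, b ++ gcgSel label_dict 1, c ++ gcgSel label_dict 2,
       d ++ gcgSelNone label_dict) := by
  induction label_dict generalizing a b c d f with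
  | nil => simp [gcgSel, gcgSelNone]
  | cons hd tl ih =>
    obtain ⟨k, v⟩ := hd
    rw [List.foldl_cons]
    have hb := gcgBody_fst a b c d f k v
    rcases h : gcgBody ((a, b, c, d), f) (k, v) with ⟨⟨a', b', c', d'⟩, f'⟩
    rw [h] at hb
    simp only [Prod.mk.injEq] at hb
    obtain ⟨ha, hb1, hc, hd⟩ := hb
    subst ha; subst hb1; subst hc; subst hd
    rw [ih]
    refine Prod.ext ?_ (Prod.ext ?_ (Prod.ext ?_ ?_)) <;>
      simp [gcgSel, gcgSelNone, List.filterMap_cons] <;> split_ifs <;> simp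

-- ===== VERDICT (by name: the statement is the Claim_ definition above) =====
theorem get_class_groups_spec : Claim_equal_get_class_groups := by
  intro label_dict _ _
  unfold Spec_get_class_groups get_class_groups get_class_groups_alt
  simp only []
  rw [show (List.foldl gcgBody (([], [], [], []), 0) label_dict).1 =
        ([] ++ gcgSel label_dict 0, [] ++ gcgSel label_dict 1, [] ++ gcgSel label_dict 2,
         [] ++ gcgSelNone label_dict) from gcg_fold label_dict [] [] [] [] 0]
  simp
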